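-- pv_equiv track=rewrite | github.com/nkong1/wecc-h2-demand | industry/industry_h2.py | get_naics_code
-- ===== SOURCE A (Python) =====
-- sector_by_naics = {'Iron_and_Steel': [331110, 331511, 3312], 'Aluminum': [3313], 'Cement': [327310],
--                    'Chemicals': [325], 'Refineries': [324110], 'Glass': [ 327211,
--                     327212, 327213, 327215]}
--
-- def get_naics_code(naics):
--     """
--     Returns the naics code (int) used in our model, corresponding to the input naics code (str or int).
--
--     Ex: 325121 -> 325, 327211 -> 327211
--     """
--     naics_str = str(naics)
--     for sector, codes in sector_by_naics.items():
--         for code in codes: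
--             code_str = str(code)
--             # Exact match
--             if naics_str == code_str:
--                 return int(code_str)
--             # Prefix match
--             if naics_str.startswith(code_str):
--                 return int(code_str)
--     return None
-- ===== SOURCE B (Python) =====
-- sector_by_naics = {'Iron_and_Steel': [331110, 331511, 3312], 'Aluminum': [3313], 'Cement': [327310],
--                    'Chemicals': [325], 'Refineries': [324110], 'Glass': [ 327211,
--                     327212, 327213, 327215]}
--
-- # Flat index: code string -> model code, plus the distinct code lengths present.
-- _code_by_str = {str(c): int(c) for codes in sector_by_naics.values() for c in codes}
-- _lengths = sorted({len(k) for k in _code_by_str})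
--
-- def get_naics_code(naics):
--     """
--     Returns the naics code (int) used in our model, corresponding to the input naics code (str or int).
--
--     Ex: 325121 -> 325, 327211 -> 327211
--     """
--     s = str(naics)
--     for L in _lengths:
--         v = _code_by_str.get(s[:L])
--         if v is not None:
--             return v
--     return None
-- ===== Notes on version B (the rewrite author's own statement) =====
-- stated objective: idiomatic
-- what changed: Replaces A's nested scan over every sector's code list with startswith per code by a flat str(code)->code dict built once plus the sorted distinct code lengths, looking up each prefix of the input once per length; correctness relies on no code string being a prefix of another.
import Mathlib
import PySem

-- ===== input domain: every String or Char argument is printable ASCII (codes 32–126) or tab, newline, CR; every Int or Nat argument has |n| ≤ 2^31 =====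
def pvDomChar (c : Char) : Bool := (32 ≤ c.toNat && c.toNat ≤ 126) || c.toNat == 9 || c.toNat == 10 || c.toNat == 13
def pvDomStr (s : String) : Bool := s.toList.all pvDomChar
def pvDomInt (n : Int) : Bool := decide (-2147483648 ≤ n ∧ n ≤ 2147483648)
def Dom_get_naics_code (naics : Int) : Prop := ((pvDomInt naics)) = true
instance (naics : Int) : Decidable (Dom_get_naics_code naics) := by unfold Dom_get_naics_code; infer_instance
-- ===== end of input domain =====

-- B replaces A's nested scan over every sector's codes (startswith per code) by a flat
-- str(code) -> code index consulted once per distinct code length on the input's prefixes (idiomatic).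
-- Strings are handled on the List Char side (PySem.Chars); str(naics) is PySem.Int.toChars.

-- ===== PORT A =====
def sector_by_naics : List (String × List Int) :=
  [("Iron_and_Steel", [331110, 331511, 3312]), ("Aluminum", [3313]), ("Cement", [327310]),
   ("Chemicals", [325]), ("Refineries", [324110]), ("Glass", [327211, 327212, 327213, 327215])]

-- inner 'for code in codes' loop; 'return int(code_str)' is PySem.Int.ofChars? code_str
-- (exact: it is never none here, since code_str = str(code))
def pvLoopCodes (s : List Char) : List Int → Option Int
  | [] => none
  | c :: rest =>
    let cs := PySem.Int.toChars c
    if s == cs then PySem.Int.ofChars? cs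
    else if PySem.Chars.startswith s cs then PySem.Int.ofChars? cs
    else pvLoopCodes s rest

-- outer 'for sector, codes in sector_by_naics.items()' loop
def pvLoopSectors (s : List Char) : List (String × List Int) → Option Int
  | [] => none
  | (_, codes) :: rest =>
    match pvLoopCodes s codes with
    | some v => some v
    | none => pvLoopSectors s rest

def get_naics_code (naics : Int) : Option Int :=
  pvLoopSectors (PySem.Int.toChars naics) sector_by_naics

-- ===== PORT B =====
-- _code_by_str = {str(c): int(c) for codes in sector_by_naics.values() for c in codes}
def pvCodeByStr : PySem.Dict (List Char) Int :=
  ((sector_by_naics.map Prod.snd).flatten).foldl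
    (fun d c => d.insert (PySem.Int.toChars c) c) PySem.Dict.empty

-- _lengths = sorted({len(k) for k in _code_by_str})
def pvLengths : List Int :=
  PySem.List.sorted
    (PySem.Set.ofList ((PySem.Dict.keys pvCodeByStr).map (fun k => (PySem.Chars.len k : Int))))
    (fun x => x) false

-- 'for L in _lengths: v = _code_by_str.get(s[:L]); if v is not None: return v'
def pvLoopLens (s : List Char) : List Int → Option Int
  | [] => none
  | L :: rest =>
    match PySem.Dict.get? pvCodeByStr (PySem.Chars.slice s none (some L)) with
    | some v => some v
    | none => pvLoopLens s rest

def get_naics_code_alt (naics : Int) : Option Int :=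
  pvLoopLens (PySem.Int.toChars naics) pvLengths

-- ===== PRECONDITION & SPEC =====
def Spec_get_naics_code (naics : Int) (out : Option Int) : Prop := out = get_naics_code_alt naics
instance (naics : Int) (out : Option Int) : Decidable (Spec_get_naics_code naics out) := by unfold Spec_get_naics_code; infer_instance

-- ===== CLAIM (what is proved, stated in full; the proofs are below) =====
def Claim_equal_get_naics_code : Prop := ∀ (naics : Int), Dom_get_naics_code naics → Spec_get_naics_code naics (get_naics_code naics)

-- ===== LEMMAS AND PROOFS =====

-- the eleven codes in A's (flattened) scan order, and the key/value pairs of B's dict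
def pvCodes : List Int := [331110, 331511, 3312, 3313, 327310, 325, 324110, 327211, 327212, 327213, 327215]
def pvKVs : List (List Char × Int) := pvCodes.map (fun c => (PySem.Int.toChars c, c))

lemma pv_take_beq_eq (s k : List Char) (L : Nat) (h : k.length = L) :
    (k == s.take L) = PySem.Chars.startswith s k := by
  cases hb : PySem.Chars.startswith s k
  · rw [beq_eq_false_iff_ne]
    intro he
    have : k <+: s := he ▸ List.take_prefix L s
    rw [← PySem.Chars.startswith_iff (s := s) (p := k)] at this
    simp [this] at hb
  · have hp : k <+: s := (PySem.Chars.startswith_iff _ _).mp hb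
    have := List.prefix_iff_eq_take.mp hp
    rw [← h, ← this]
    simp

lemma pv_take_beq_lt (s k : List Char) (L : Nat) (h : k.length < L) :
    (k == s.take L) = (k == s) := by
  by_cases he : k = s.take L
  · have hlen : (s.take L).length = k.length := by rw [← he]
    have hsl : s.length ≤ L := by
      simp [List.length_take] at hlen
      omega
    have : s.take L = s := List.take_of_length_le hsl
    rw [he, this]
  · have hne : k ≠ s := by
      intro hk
      subst hk
      exact he (List.take_of_length_le (le_of_lt h)).symm
    simp [he, hne]

lemma pv_take_beq_gt (s k : List Char) (L : Nat) (h : L < k.length) :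
    (k == s.take L) = false := by
  rw [beq_eq_false_iff_ne]
  intro he
  have := congrArg List.length he
  simp [List.length_take] at this
  omega

lemma pv_SW_disj (s k1 k2 : List Char) (h12 : ¬ k1 <+: k2) (h21 : ¬ k2 <+: k1)
    (h : PySem.Chars.startswith s k1 = true) : PySem.Chars.startswith s k2 = false := by
  cases hb : PySem.Chars.startswith s k2
  · rfl
  · exfalso
    have h1 : k1 <+: s := (PySem.Chars.startswith_iff _ _).mp h
    have h2 : k2 <+: s := (PySem.Chars.startswith_iff _ _).mp hb
    exact (List.prefix_or_prefix_of_prefix h1 h2).elim h12 h21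

lemma pv_beq_false (s k : List Char) (h : PySem.Chars.startswith s k = false) : (k == s) = false := by
  rw [beq_eq_false_iff_ne]
  intro he
  subst he
  rw [(PySem.Chars.startswith_iff _ _).mpr (List.prefix_refl k)] at h
  simp at h

lemma pvLoopCodes_eq (s : List Char) (codes : List Int)
    (h : ∀ c ∈ codes, PySem.Int.ofChars? (PySem.Int.toChars c) = some c) :
    pvLoopCodes s codes = codes.find? (fun c => PySem.Chars.startswith s (PySem.Int.toChars c)) := by
  induction codes with
  | nil => rfl
  | cons c rest ih =>
    have hc := h c (List.mem_cons_self)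
    have hrest : ∀ c ∈ rest, PySem.Int.ofChars? (PySem.Int.toChars c) = some c :=
      fun d hd => h d (List.mem_cons_of_mem _ hd)
    by_cases hbe : s = PySem.Int.toChars c
    · subst hbe
      have hsw : PySem.Chars.startswith (PySem.Int.toChars c) (PySem.Int.toChars c) = true := by
        rw [PySem.Chars.startswith_iff]
      simp [pvLoopCodes, hc, hsw]
    · by_cases hsw : PySem.Chars.startswith s (PySem.Int.toChars c) = true
      · simp [pvLoopCodes, hbe, hc, hsw]
      · simp only [Bool.not_eq_true] at hsw
        simp [pvLoopCodes, hbe, hsw, ih hrest]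

lemma pvLoopSectors_eq (s : List Char) (items : List (String × List Int))
    (h : ∀ p ∈ items, ∀ c ∈ p.2, PySem.Int.ofChars? (PySem.Int.toChars c) = some c) :
    pvLoopSectors s items
      = (items.flatMap Prod.snd).find? (fun c => PySem.Chars.startswith s (PySem.Int.toChars c)) := by
  induction items with
  | nil => rfl
  | cons p rest ih =>
    obtain ⟨sec, codes⟩ := p
    have hcodes : ∀ c ∈ codes, PySem.Int.ofChars? (PySem.Int.toChars c) = some c :=
      fun c hc => h (sec, codes) List.mem_cons_self c hc
    have hrest : ∀ q ∈ rest, ∀ c ∈ q.2, PySem.Int.ofChars? (PySem.Int.toChars c) = some c :=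
      fun q hq => h q (List.mem_cons_of_mem _ hq)
    simp only [pvLoopSectors, pvLoopCodes_eq s codes hcodes, List.flatMap_cons, List.find?_append]
    cases hf : codes.find? (fun c => PySem.Chars.startswith s (PySem.Int.toChars c)) with
    | none => simp [ih hrest]
    | some v => simp

lemma pv_hflat : sector_by_naics.flatMap Prod.snd = pvCodes := by rfl
lemma pv_hlens : pvLengths = [(3:Int), 4, 6] := by decide
lemma pv_hdict : pvCodeByStr = PySem.Dict.mk pvKVs := by rfl

lemma pv_main (s : List Char) : pvLoopSectors s sector_by_naics = pvLoopLens s pvLengths := by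
  rw [pvLoopSectors_eq s _ (by decide), pv_hflat, pv_hlens]
  simp only [pvLoopLens, pv_hdict, PySem.Dict.get?, PySem.Chars.slice_eq_listSlice]
  simp only [PySem.List.slice_to (b := 3) _ (by decide), PySem.List.slice_to (b := 4) _ (by decide),
    PySem.List.slice_to (b := 6) _ (by decide)]
  simp only [show ((3:Int).toNat) = 3 from rfl, show ((4:Int).toNat) = 4 from rfl,
    show ((6:Int).toNat) = 6 from rfl, pvKVs, pvCodes, List.map_cons, List.map_nil]
  simp only [List.find?_cons, List.find?_nil]
  simp only [pv_take_beq_gt s (PySem.Int.toChars 331110) 3 (by decide),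
    pv_take_beq_gt s (PySem.Int.toChars 331511) 3 (by decide),
    pv_take_beq_gt s (PySem.Int.toChars 3312) 3 (by decide),
    pv_take_beq_gt s (PySem.Int.toChars 3313) 3 (by decide),
    pv_take_beq_gt s (PySem.Int.toChars 327310) 3 (by decide),
    pv_take_beq_eq s (PySem.Int.toChars 325) 3 (by decide),
    pv_take_beq_gt s (PySem.Int.toChars 324110) 3 (by decide),
    pv_take_beq_gt s (PySem.Int.toChars 327211) 3 (by decide),
    pv_take_beq_gt s (PySem.Int.toChars 327212) 3 (by decide),
    pv_take_beq_gt s (PySem.Int.toChars 327213) 3 (by decide),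
    pv_take_beq_gt s (PySem.Int.toChars 327215) 3 (by decide),
    pv_take_beq_gt s (PySem.Int.toChars 331110) 4 (by decide),
    pv_take_beq_gt s (PySem.Int.toChars 331511) 4 (by decide),
    pv_take_beq_eq s (PySem.Int.toChars 3312) 4 (by decide),
    pv_take_beq_eq s (PySem.Int.toChars 3313) 4 (by decide),
    pv_take_beq_gt s (PySem.Int.toChars 327310) 4 (by decide),
    pv_take_beq_lt s (PySem.Int.toChars 325) 4 (by decide),
    pv_take_beq_gt s (PySem.Int.toChars 324110) 4 (by decide),
    pv_take_beq_gt s (PySem.Int.toChars 327211) 4 (by decide),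
    pv_take_beq_gt s (PySem.Int.toChars 327212) 4 (by decide),
    pv_take_beq_gt s (PySem.Int.toChars 327213) 4 (by decide),
    pv_take_beq_gt s (PySem.Int.toChars 327215) 4 (by decide),
    pv_take_beq_eq s (PySem.Int.toChars 331110) 6 (by decide),
    pv_take_beq_eq s (PySem.Int.toChars 331511) 6 (by decide),
    pv_take_beq_lt s (PySem.Int.toChars 3312) 6 (by decide),
    pv_take_beq_lt s (PySem.Int.toChars 3313) 6 (by decide),
    pv_take_beq_eq s (PySem.Int.toChars 327310) 6 (by decide),
    pv_take_beq_lt s (PySem.Int.toChars 325) 6 (by decide),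
    pv_take_beq_eq s (PySem.Int.toChars 324110) 6 (by decide),
    pv_take_beq_eq s (PySem.Int.toChars 327211) 6 (by decide),
    pv_take_beq_eq s (PySem.Int.toChars 327212) 6 (by decide),
    pv_take_beq_eq s (PySem.Int.toChars 327213) 6 (by decide),
    pv_take_beq_eq s (PySem.Int.toChars 327215) 6 (by decide)]
  cases h325 : PySem.Chars.startswith s (PySem.Int.toChars 325) with
  | true => simp [pv_SW_disj s (PySem.Int.toChars 325) (PySem.Int.toChars 331110) (by decide) (by decide) h325, pv_SW_disj s (PySem.Int.toChars 325) (PySem.Int.toChars 331511) (by decide) (by decide) h325, pv_SW_disj s (PySem.Int.toChars 325) (PySem.Int.toChars 3312) (by decide) (by decide) h325, pv_SW_disj s (PySem.Int.toChars 325) (PySem.Int.toChars 3313) (by decide) (by decide) h325, pv_SW_disj s (PySem.Int.toChars 325) (PySem.Int.toChars 327310) (by decide) (by decide) h325]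
  | false =>
    cases h3312 : PySem.Chars.startswith s (PySem.Int.toChars 3312) with
    | true => simp [pv_SW_disj s (PySem.Int.toChars 3312) (PySem.Int.toChars 331110) (by decide) (by decide) h3312, pv_SW_disj s (PySem.Int.toChars 3312) (PySem.Int.toChars 331511) (by decide) (by decide) h3312]
    | false =>
      cases h3313 : PySem.Chars.startswith s (PySem.Int.toChars 3313) with
      | true => simp [pv_SW_disj s (PySem.Int.toChars 3313) (PySem.Int.toChars 331110) (by decide) (by decide) h3313, pv_SW_disj s (PySem.Int.toChars 3313) (PySem.Int.toChars 331511) (by decide) (by decide) h3313]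
      | false =>
        cases h331110 : PySem.Chars.startswith s (PySem.Int.toChars 331110) with
        | true => simp [pv_beq_false s (PySem.Int.toChars 325) h325]
        | false =>
          cases h331511 : PySem.Chars.startswith s (PySem.Int.toChars 331511) with
          | true => simp [pv_beq_false s (PySem.Int.toChars 325) h325]
          | false =>
            cases h327310 : PySem.Chars.startswith s (PySem.Int.toChars 327310) with
            | true => simp [pv_beq_false s (PySem.Int.toChars 325) h325, pv_beq_false s (PySem.Int.toChars 3312) h3312, pv_beq_false s (PySem.Int.toChars 3313) h3313]
            | false =>
              cases h324110 : PySem.Chars.startswith s (PySem.Int.toChars 324110) with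
              | true => simp [pv_beq_false s (PySem.Int.toChars 325) h325, pv_beq_false s (PySem.Int.toChars 3312) h3312, pv_beq_false s (PySem.Int.toChars 3313) h3313]
              | false =>
                cases h327211 : PySem.Chars.startswith s (PySem.Int.toChars 327211) with
                | true => simp [pv_beq_false s (PySem.Int.toChars 325) h325, pv_beq_false s (PySem.Int.toChars 3312) h3312, pv_beq_false s (PySem.Int.toChars 3313) h3313]
                | false =>
                  cases h327212 : PySem.Chars.startswith s (PySem.Int.toChars 327212) with
                  | true => simp [pv_beq_false s (PySem.Int.toChars 325) h325, pv_beq_false s (PySem.Int.toChars 3312) h3312, pv_beq_false s (PySem.Int.toChars 3313) h3313]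
                  | false =>
                    cases h327213 : PySem.Chars.startswith s (PySem.Int.toChars 327213) with
                    | true => simp [pv_beq_false s (PySem.Int.toChars 325) h325, pv_beq_false s (PySem.Int.toChars 3312) h3312, pv_beq_false s (PySem.Int.toChars 3313) h3313]
                    | false =>
                      cases h327215 : PySem.Chars.startswith s (PySem.Int.toChars 327215) with
                      | true => simp [pv_beq_false s (PySem.Int.toChars 325) h325, pv_beq_false s (PySem.Int.toChars 3312) h3312, pv_beq_false s (PySem.Int.toChars 3313) h3313]
                      | false =>
                        simp [pv_beq_false s (PySem.Int.toChars 325) h325, pv_beq_false s (PySem.Int.toChars 3312) h3312, pv_beq_false s (PySem.Int.toChars 3313) h3313]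

-- ===== VERDICT (by name: the statement is the Claim_ definition above) =====
theorem get_naics_code_spec : Claim_equal_get_naics_code := by
  intro naics _
  unfold Spec_get_naics_code get_naics_code get_naics_code_alt
  exact pv_main (PySem.Int.toChars naics)
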